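-- pv_equiv track=rewrite | github.com/OliveJuiceLin/nanoverl | nanoverl/core/batch.py | _range_for_repeat
-- ===== SOURCE A (Python) =====
-- from typing import Any, Dict, Iterable, List, Mapping, Sequence, Tuple
--
-- def _range_for_repeat(length: int, repeat_times: int, interleave: bool) -> List[int]:
--     if interleave:
--         indices: List[int] = []
--         for index in range(length):
--             indices.extend([index] * repeat_times)
--         return indices
--     indices = list(range(length))
--     return indices * repeat_times
-- ===== SOURCE B (Python) =====
-- def _range_for_repeat(length: int, repeat_times: int, interleave: bool):
--     l = max(length, 0)
--     r = max(repeat_times, 0)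
--     n = l * r
--     if interleave:
--         return [p // r for p in range(n)]
--     return [p % l for p in range(n)]
-- ===== Notes on version B (the rewrite author's own statement) =====
-- stated objective: alternative
-- what changed: Replaces the block-building (extend with [i]*r per index, or list-multiplication of range(length)) by one flat comprehension over range(length*repeat_times) computing each position's index arithmetically as p//repeat_times (interleaved) or p%length (blocked).
import Mathlib
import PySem

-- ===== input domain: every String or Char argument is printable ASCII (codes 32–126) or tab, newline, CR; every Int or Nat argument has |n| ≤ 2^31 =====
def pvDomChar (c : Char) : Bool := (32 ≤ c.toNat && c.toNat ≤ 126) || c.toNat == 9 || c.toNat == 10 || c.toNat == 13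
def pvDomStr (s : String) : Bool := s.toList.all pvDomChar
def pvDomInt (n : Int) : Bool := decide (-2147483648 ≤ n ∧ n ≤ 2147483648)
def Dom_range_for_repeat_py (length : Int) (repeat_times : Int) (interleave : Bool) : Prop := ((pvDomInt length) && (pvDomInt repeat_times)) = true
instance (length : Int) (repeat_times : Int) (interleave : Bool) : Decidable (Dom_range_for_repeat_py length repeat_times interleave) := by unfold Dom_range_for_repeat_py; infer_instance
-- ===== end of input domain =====

-- ===== PORT A =====
-- B builds the same index list by per-position arithmetic (p // r, p % l) over one flat
-- range instead of A's block construction; alternative decomposition, same cost.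
def range_for_repeat_py (length : Int) (repeat_times : Int) (interleave : Bool) : List Int :=
  if interleave then
    -- indices = []; for index in range(length): indices.extend([index] * repeat_times)
    (PySem.List.pyRange 0 length 1).foldl
      (fun indices index => indices ++ List.replicate repeat_times.toNat index) []
  else
    -- indices = list(range(length)); return indices * repeat_times
    (List.replicate repeat_times.toNat (PySem.List.pyRange 0 length 1)).flatten

-- ===== PORT B =====
def range_for_repeat_py_alt (length : Int) (repeat_times : Int) (interleave : Bool) : List Int :=
  let l := max length 0
  let r := max repeat_times 0
  let n := l * r
  if interleave then
    (PySem.List.pyRange 0 n 1).map (fun p => PySem.Int.floordiv p r)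
  else
    (PySem.List.pyRange 0 n 1).map (fun p => PySem.Int.mod p l)

-- ===== PRECONDITION & SPEC =====
def Spec_range_for_repeat_py (length : Int) (repeat_times : Int) (interleave : Bool) (out : List Int) : Prop := out = range_for_repeat_py_alt length repeat_times interleave
instance (length : Int) (repeat_times : Int) (interleave : Bool) (out : List Int) : Decidable (Spec_range_for_repeat_py length repeat_times interleave out) := by unfold Spec_range_for_repeat_py; infer_instance

-- ===== CLAIM (what is proved, stated in full; the proofs are below) =====
def Claim_equal_range_for_repeat_py : Prop := ∀ (length : Int) (repeat_times : Int) (interleave : Bool), Dom_range_for_repeat_py length repeat_times interleave → Spec_range_for_repeat_py length repeat_times interleave (range_for_repeat_py length repeat_times interleave)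

-- ===== LEMMAS AND PROOFS =====

-- ===== VERDICT (by name: the statement is the Claim_ definition above) =====
lemma nat_interleave (l r : Nat) :
    (List.range (l * r)).map (fun k => k / r) = (List.range l).flatMap (fun i => List.replicate r i) := by
  induction l with
  | zero => simp
  | succ l ih =>
    have h1 : (l + 1) * r = l * r + r := by ring
    rw [h1, List.range_add, List.map_append, ih, List.range_succ, List.flatMap_append,
      List.flatMap_cons, List.flatMap_nil, List.append_nil, List.map_map]
    congr 1
    rw [List.eq_replicate_iff]
    refine ⟨by simp, ?_⟩
    intro b hb
    simp only [List.mem_map, List.mem_range, Function.comp_apply] at hb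
    obtain ⟨j, hj, rfl⟩ := hb
    have hj0 : j / r = 0 := Nat.div_eq_of_lt hj
    rw [Nat.mul_comm l r, Nat.mul_add_div (by omega), hj0]
    omega

lemma nat_blocked (l r : Nat) :
    (List.range (l * r)).map (fun k => k % l) = (List.replicate r (List.range l)).flatten := by
  induction r with
  | zero => simp
  | succ r ih =>
    have h1 : l * (r + 1) = l * r + l := by ring
    rw [h1, List.range_add, List.map_append, ih, List.replicate_succ', List.flatten_append,
      List.flatten_cons, List.flatten_nil, List.append_nil, List.map_map]
    congr 1
    conv_rhs => rw [← List.map_id (List.range l)]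
    refine List.map_congr_left ?_
    intro j hj
    simp only [List.mem_range] at hj
    simp only [Function.comp_apply, id_eq]
    rw [Nat.mul_add_mod, Nat.mod_eq_of_lt hj]

theorem range_for_repeat_py_spec : Claim_equal_range_for_repeat_py := by
  intro length repeat_times interleave _
  unfold Spec_range_for_repeat_py range_for_repeat_py range_for_repeat_py_alt
  have hml : max length 0 = ((length.toNat : Nat) : Int) := by omega
  have hmr : max repeat_times 0 = ((repeat_times.toNat : Nat) : Int) := by omega
  set l := length.toNat with hl
  set r := repeat_times.toNat with hr
  have hrange : PySem.List.pyRange 0 length 1 = List.map (fun k : Nat => (k : Int)) (List.range l) := by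
    rw [PySem.List.pyRange_one]
    simp only [zero_add, sub_zero]
    rw [hl]
  have hn : max length 0 * max repeat_times 0 = ((l * r : Nat) : Int) := by
    rw [hml, hmr]; push_cast; ring
  cases interleave with
  | true =>
    simp only [reduceIte]
    rw [PySem.List.foldl_append_eq_flatMap, List.nil_append, hrange, hn, hmr,
      PySem.List.pyRange_zero_natCast, List.map_map]
    have hB : ((fun p => PySem.Int.floordiv p (r : Int)) ∘ fun k : Nat => (k : Int)) =
        (fun k : Nat => ((k : Int))) ∘ (fun k : Nat => k / r) := by
      funext k
      simp [PySem.Int.floordiv_natCast]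
    rw [hB, ← List.map_map, nat_interleave, List.map_flatMap]
    simp [List.flatMap_map, List.map_replicate]
  | false =>
    simp only [Bool.false_eq_true, reduceIte]
    rw [hrange, hn, hml, PySem.List.pyRange_zero_natCast, List.map_map]
    have hB : ((fun p => PySem.Int.mod p (l : Int)) ∘ fun k : Nat => (k : Int)) =
        (fun k : Nat => ((k : Int))) ∘ (fun k : Nat => k % l) := by
      funext k
      simp [PySem.Int.mod_natCast]
    rw [hB, ← List.map_map, nat_blocked, List.map_flatten, List.map_replicate]
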